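/- GENERATED by tools/from_farm_form.py from prooffarm-gif/accepted/DGifSetupDecompress.2/Lemmas.lean (a worked proof of the farm's unit `DGifSetupDecompress.2`,
   accepted by the verdict) — do not edit. -/
import Gif.Spec.Units.DGifSetupDecompress_2
import Gif.Spec.AllSegs

/-!
  Lemmas for the unit `DGifSetupDecompress.2` (the store block of `DGifSetupDecompress`, dgif_lib.c:834-846, 106205H … 1062E6H).

      sd2_word_cases      a word with a value in 2 … 8 is one of seven literals
      sd2_vals            the values the store block computes from `CodeSize` (`1 << CodeSize`, `+ 1`, `+ 2`, `CodeSize + 1`), as numbers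
      sd2_lzok            `LZOK` from the nine fields the block stores, read back as the walker leaves them
      sd2_carry           `Body` through the stores of the block (the return addresses of the check calls, the LZW scalars
                          `[pv + 8, pv + 56)`, `Buf[0]`), and the reader's measure unchanged
-/

open X86 X86.User Asan ProgX.Base ProgX.Base.Spec Gif.Spec

namespace Gif.Spec.DGifSetupDecompress_2

/-- **A word with a value in 2 … 8 is one of seven literals** (`CodeSize` behind the test of l.828): the bit-vector terms the walker
leaves for `1 << CodeSize` are then closed terms. -/
theorem sd2_word_cases (x : Word) (h2 : 2 ≤ x.toNat) (h8 : x.toNat ≤ 8) :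
    x = 2 ∨ x = 3 ∨ x = 4 ∨ x = 5 ∨ x = 6 ∨ x = 7 ∨ x = 8 := by
  have hx : x = UInt64.ofNat x.toNat := (UInt64.ofNat_toNat).symm
  have hc : x.toNat = 2 ∨ x.toNat = 3 ∨ x.toNat = 4 ∨ x.toNat = 5 ∨ x.toNat = 6 ∨ x.toNat = 7 ∨ x.toNat = 8 := by
    omega
  rcases hc with h | h | h | h | h | h | h
  all_goals rw [h] at hx
  · exact Or.inl hx
  · exact Or.inr (Or.inl hx)
  · exact Or.inr (Or.inr (Or.inl hx))
  · exact Or.inr (Or.inr (Or.inr (Or.inl hx)))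
  · exact Or.inr (Or.inr (Or.inr (Or.inr (Or.inl hx))))
  · exact Or.inr (Or.inr (Or.inr (Or.inr (Or.inr (Or.inl hx)))))
  · exact Or.inr (Or.inr (Or.inr (Or.inr (Or.inr (Or.inr hx)))))

/-- **The values of the store block** (l.835-839), for `x = rbp = CodeSize` in 2 … 8, in the walker's forms: `BitsPerPixel = ebp ≤ 8`;
`ClearCode = 1 << cl ≤ 256` (`mov ebx, 1 ; shl ebx, cl`); `EOFCode = ClearCode + 1` (`lea r15d, [rbx + 1]`); `RunningCode =
ClearCode + 2` (`add ebx, 2`); `RunningBits = CodeSize + 1` (`add ebp, 1`): no 32-bit operation wraps. -/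
theorem sd2_vals (x : Word) (h2 : 2 ≤ x.toNat) (h8 : x.toNat ≤ 8) :
    (Word.part Width.w32 x).toNat ≤ 8 ∧
    (1#32 <<< ((BitVec.setWidth 8 (Word.part Width.w32 x)).toNat % 32)).toNat ≤ 256 ∧
    (BitVec.setWidth 32 (Word.ofBV (1#32 <<< ((BitVec.setWidth 8 (Word.part Width.w32 x)).toNat % 32)) + 1).toBitVec).toNat
      = (1#32 <<< ((BitVec.setWidth 8 (Word.part Width.w32 x)).toNat % 32)).toNat + 1 ∧
    (1#32 <<< ((BitVec.setWidth 8 (Word.part Width.w32 x)).toNat % 32) + 2#32).toNat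
      = (1#32 <<< ((BitVec.setWidth 8 (Word.part Width.w32 x)).toNat % 32)).toNat + 2 ∧
    (Word.part Width.w32 x + 1#32).toNat = (Word.part Width.w32 x).toNat + 1 := by
  rcases sd2_word_cases x h2 h8 with h | h | h | h | h | h | h
  all_goals subst h
  all_goals decide

/-- **`LZOK` behind the store block**: the nine fields `LZOK` reads hold what the block stored (`hbpp` … `hshift`: each read back
through the later stores), for `x = CodeSize` in 2 … 8. [LZ1-LZ6] -/
theorem sd2_lzok (mem : Mem) (pv : Nat) (x : Word) (h2 : 2 ≤ x.toNat) (h8 : x.toNat ≤ 8)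
    (hbpp : rd mem (pv + 8) 4 = (Word.part Width.w32 x).toNat)
    (hclear : rd mem (pv + 12) 4 = (1#32 <<< ((BitVec.setWidth 8 (Word.part Width.w32 x)).toNat % 32)).toNat)
    (heof : rd mem (pv + 16) 4 =
      (BitVec.setWidth 32 (Word.ofBV (1#32 <<< ((BitVec.setWidth 8 (Word.part Width.w32 x)).toNat % 32)) + 1).toBitVec).toNat)
    (hcode : rd mem (pv + 20) 4 = (1#32 <<< ((BitVec.setWidth 8 (Word.part Width.w32 x)).toNat % 32) + 2#32).toNat)
    (hbits : rd mem (pv + 24) 4 = (Word.part Width.w32 x + 1#32).toNat)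
    (hsp : rd mem (pv + 40) 4 = 0)
    (hshift : rd mem (pv + 44) 4 = 0) :
    LZOK mem pv := by
  obtain ⟨v1, v2, v3, v4, v5⟩ := sd2_vals x h2 h8
  refine ⟨?_, ?_, ?_, ?_, ?_, ?_, ?_, ?_, ?_⟩
  all_goals simp only [gfield]
  all_goals omega

/-- **`Body` THROUGH THE STORES OF THE BLOCK.** `v` is a state with `Body` (the block's entry), `s` a later state of the block: the stack
pointer is the body's, `r13` still holds the shadow index, the text is unchanged, the ABI's invariant holds, no shadow byte was
written, and nothing was written but the slot of the check calls' return addresses `[RA − 128, RA − 120)`, the LZW scalars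
`[pv + 8, pv + 56)` and `Buf[0]`. Then `Body` holds of `s` (at the address `s` is at) and the reader's measure is what it was. -/
theorem sd2_carry {cut cut' : Word} {H : Heap} {rest : List Obj} {frames : List (Nat × FrameLayout)} {F : Forest} {R : Rd}
    {u₀ e : State} {ret : Word} {v s : State}
    (hb : DGifSetupDecompress.Body cut H rest frames F R u₀ e ret v)
    (hrip : s.rip = cut') (hrsp : s.reg .rsp = e.reg .rsp - 120) (hr13 : s.reg .r13 = v.reg .r13)
    (hcode : Mem.EqOn ProgX.Base.L.textLo ProgX.Base.L.textHi u₀.mem s.mem) (habi : (conv u₀).inv s)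
    (hun : ShadowUntouched v.mem s.mem)
    (hs : Mem.SameExcept [⟨(e.reg .rsp).toNat - 128, (e.reg .rsp).toNat - 120⟩, ⟨F.pv + 8, F.pv + 56⟩, ⟨F.pv + 88, F.pv + 89⟩]
      v.mem s.mem) :
    DGifSetupDecompress.Body cut' H rest frames F R u₀ e ret s ∧ Gif.Spec.rem R s.mem = Gif.Spec.rem R v.mem := by
  have henv : Env H rest frames F R e := hb.pre.1
  have hroom : 0x700000 + 304 ≤ (e.reg .rsp).toNat := hb.entry.room
  have htop : (e.reg .rsp).toNat + 8 ≤ 0x800000 := hb.entry.top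
  have hok := hb.inv.heap
  have hbase := henv.heap.base
  have hcur := henv.ctx.cursor_range henv.heap.inv.shadow
  have hpin := hb.ok.owns.inside hok (o := (F.pv, 24936)) (List.mem_cons_of_mem _ List.mem_cons_self)
  simp only at hpin
  have hp1 : 0x800040 ≤ F.pv := by omega
  have hp2 : F.pv + 24968 ≤ 0xC00000 := by omega
  clear hpin
  -- the three windows, one by one
  have hcases : ∀ w : Span, w ∈ [(⟨(e.reg .rsp).toNat - 128, (e.reg .rsp).toNat - 120⟩ : Span), ⟨F.pv + 8, F.pv + 56⟩,
      ⟨F.pv + 88, F.pv + 89⟩] →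
      (w.lo = (e.reg .rsp).toNat - 128 ∧ w.hi = (e.reg .rsp).toNat - 120) ∨ (w.lo = F.pv + 8 ∧ w.hi = F.pv + 56) ∨
      (w.lo = F.pv + 88 ∧ w.hi = F.pv + 89) := by
    intro w hw
    simp only [List.mem_cons, List.mem_nil_iff, or_false] at hw
    rcases hw with h | h | h
    · rw [h]
      exact Or.inl ⟨rfl, rfl⟩
    · rw [h]
      exact Or.inr (Or.inl ⟨rfl, rfl⟩)
    · rw [h]
      exact Or.inr (Or.inr ⟨rfl, rfl⟩)
  -- every window is loose
  have hloose : ∀ w, w ∈ [(⟨(e.reg .rsp).toNat - 128, (e.reg .rsp).toNat - 120⟩ : Span), ⟨F.pv + 8, F.pv + 56⟩,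
      ⟨F.pv + 88, F.pv + 89⟩] → Loose H F R w := by
    intro w hw
    rcases hcases w hw with ⟨a, b⟩ | ⟨a, b⟩ | ⟨a, b⟩
    · exact Loose.stack hok (by omega) (by omega) (by omega)
    · exact Loose.pvBody (Or.inl ⟨by omega, by omega⟩)
    · exact Loose.pvBody (Or.inr ⟨by omega, by omega⟩)
  -- every window is a heap window
  have hwin : ∀ w, w ∈ [(⟨(e.reg .rsp).toNat - 128, (e.reg .rsp).toNat - 120⟩ : Span), ⟨F.pv + 8, F.pv + 56⟩,
      ⟨F.pv + 88, F.pv + 89⟩] → HeapWin H w := by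
    intro w hw
    rcases hcases w hw with ⟨a, b⟩ | ⟨a, b⟩ | ⟨a, b⟩
    · apply HeapWin.offHeap hok
      left
      omega
    · exact HeapWin.pv hok hb.ok.owns (by omega) (by omega)
    · exact HeapWin.pv hok hb.ok.owns (by omega) (by omega)
  -- every window misses the cursor
  have hoffcur : ∀ w, w ∈ [(⟨(e.reg .rsp).toNat - 128, (e.reg .rsp).toNat - 120⟩ : Span), ⟨F.pv + 8, F.pv + 56⟩,
      ⟨F.pv + 88, F.pv + 89⟩] → w.hi ≤ R.cur ∨ R.cur + 16 ≤ w.lo := by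
    intro w hw
    rcases hcases w hw with ⟨a, b⟩ | ⟨a, b⟩ | ⟨a, b⟩
    · omega
    · omega
    · omega
  -- every window misses the saved registers and the return address
  have hslots : ∀ a k : Nat, (e.reg .rsp).toNat - 120 ≤ a → a + k ≤ (e.reg .rsp).toNat + 8 →
      ∀ w, w ∈ [(⟨(e.reg .rsp).toNat - 128, (e.reg .rsp).toNat - 120⟩ : Span), ⟨F.pv + 8, F.pv + 56⟩,
        ⟨F.pv + 88, F.pv + 89⟩] → a + k ≤ w.lo ∨ w.hi ≤ a := by
    intro a k h1 h2 w hw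
    rcases hcases w hw with ⟨p, q⟩ | ⟨p, q⟩ | ⟨p, q⟩
    · omega
    · omega
    · omega
  -- the footprint since the entry: every window lies inside one of the contract's
  have hsameE : Mem.SameExcept
      [⟨(e.reg .rsp).toNat - 304, (e.reg .rsp).toNat⟩,
       shadowSpan ((e.reg .rsp).toNat - 120) ((e.reg .rsp).toNat - 56),
       ⟨F.pv + 8, F.pv + 56⟩,
       ⟨F.pv + 88, F.pv + 89⟩,
       ⟨F.pv + 8536, F.pv + 24920⟩,
       ⟨F.gif + 96, F.gif + 100⟩,
       ⟨R.cur, R.cur + 8⟩] e.mem s.mem := by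
    apply Mem.SameExcept.step_same' hb.same hs
    intro w hw
    right
    rcases hcases w hw with ⟨a, b⟩ | ⟨a, b⟩ | ⟨a, b⟩
    · exact ⟨⟨(e.reg .rsp).toNat - 304, (e.reg .rsp).toNat⟩, by simp only [List.mem_cons, true_or], by simp only; omega,
        by simp only; omega⟩
    · exact ⟨⟨F.pv + 8, F.pv + 56⟩, by simp only [List.mem_cons, true_or, or_true], by simp only; omega, by simp only; omega⟩
    · exact ⟨⟨F.pv + 88, F.pv + 89⟩, by simp only [List.mem_cons, true_or, or_true], by simp only; omega, by simp only; omega⟩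
  have e_rem : Gif.Spec.rem R s.mem = Gif.Spec.rem R v.mem := rem_sameExcept hs (by omega) hoffcur
  refine ⟨⟨hb.entry, hb.pre, hrip, hrsp, ?_, ?_, ?_, ?_, ?_, ?_, ?_, ?_, ?_, ?_, ?_, hsameE,
    ProgX.Base.conv_code_in hcode, habi⟩, e_rem⟩
  · rw [hr13]
    exact hb.r13
  · exact slot_sameExcept hs (e.reg .rsp) 8 8 _ (by omega) (by omega) hb.slot_r15 (hslots _ _ (by omega) (by omega))
  · exact slot_sameExcept hs (e.reg .rsp) 16 8 _ (by omega) (by omega) hb.slot_r14 (hslots _ _ (by omega) (by omega))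
  · exact slot_sameExcept hs (e.reg .rsp) 24 8 _ (by omega) (by omega) hb.slot_r13 (hslots _ _ (by omega) (by omega))
  · exact slot_sameExcept hs (e.reg .rsp) 32 8 _ (by omega) (by omega) hb.slot_r12 (hslots _ _ (by omega) (by omega))
  · exact slot_sameExcept hs (e.reg .rsp) 40 8 _ (by omega) (by omega) hb.slot_rbp (hslots _ _ (by omega) (by omega))
  · exact slot_sameExcept hs (e.reg .rsp) 48 8 _ (by omega) (by omega) hb.slot_rbx (hslots _ _ (by omega) (by omega))
  · rw [hs.readLE (e.reg .rsp) 8 (by omega) (hslots _ _ (by omega) (by omega))]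
    exact hb.slot_ra
  · exact hb.inv.sameExcept hun hs hwin
  · exact hb.ok.sameExcept hok ⟨hcur.1, hcur.2.1⟩ hs hloose
  · rw [e_rem]
    exact hb.rem

end Gif.Spec.DGifSetupDecompress_2
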